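-- pv_equiv track=rewrite | github.com/Reda-BENMAKDAD/TP-Tri-rapide-et-ses-variants | BENMAKDAD_REDA_TP1_A.py | tri_rapide_ex4
-- ===== SOURCE A (Python) =====
-- def echanger(tab, i, j):
--     tab[i], tab[j] = tab[j], tab[i]
--
-- def parition_ex4(tab, i, j):
--     pos_mediane = i + (j - i - 1) // 2
--     echanger(tab, i, pos_mediane)
--     indice_pivot = i
--     if (i < j):
--         for n in range(i+1, j):
--             if tab[n] < tab[indice_pivot]:
--                 i += 1
--                 echanger(tab, i, n)
--         echanger(tab, i, indice_pivot)
--     return i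
--
-- def tri_rapide_ex4(tab, deb, fin):
--     if (fin > deb):
--         pivot = parition_ex4(tab, deb, fin)
--         etapes_partition = fin - deb + 1
--         etapes_gauche = tri_rapide_ex4(tab, deb, pivot)
--         etapes_droite = tri_rapide_ex4(tab, pivot+1, fin)
--         return etapes_partition + etapes_gauche + etapes_droite
--     else:
--         return 0
-- ===== SOURCE B (Python) =====
-- def echanger(tab, i, j):
--     tab[i], tab[j] = tab[j], tab[i]
--
-- def parition_ex4(tab, i, j):
--     pos_mediane = i + (j - i - 1) // 2
--     echanger(tab, i, pos_mediane)
--     indice_pivot = i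
--     if (i < j):
--         for n in range(i+1, j):
--             if tab[n] < tab[indice_pivot]:
--                 i += 1
--                 echanger(tab, i, n)
--         echanger(tab, i, indice_pivot)
--     return i
--
-- def tri_rapide_ex4(tab, deb, fin):
--     # Iterative quicksort: explicit stack of ranges instead of recursion.
--     # The right subrange is pushed first so ranges are handled in the same
--     # (pre-order, left-first) sequence as the recursive version.
--     total = 0
--     stack = [(deb, fin)]
--     while stack:
--         d, f = stack.pop()
--         if f > d:
--             pivot = parition_ex4(tab, d, f)
--             total += f - d + 1
--             stack.append((pivot + 1, f))
--             stack.append((d, pivot))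
--     return total
-- ===== Notes on version B (the rewrite author's own statement) =====
-- stated objective: alternative
-- what changed: The recursive quicksort step-counter is replaced by an iterative loop over an explicit stack of ranges (right subrange pushed first, so ranges are partitioned in the same left-first order) with a running total; the partition helper is unchanged.
import Mathlib
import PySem

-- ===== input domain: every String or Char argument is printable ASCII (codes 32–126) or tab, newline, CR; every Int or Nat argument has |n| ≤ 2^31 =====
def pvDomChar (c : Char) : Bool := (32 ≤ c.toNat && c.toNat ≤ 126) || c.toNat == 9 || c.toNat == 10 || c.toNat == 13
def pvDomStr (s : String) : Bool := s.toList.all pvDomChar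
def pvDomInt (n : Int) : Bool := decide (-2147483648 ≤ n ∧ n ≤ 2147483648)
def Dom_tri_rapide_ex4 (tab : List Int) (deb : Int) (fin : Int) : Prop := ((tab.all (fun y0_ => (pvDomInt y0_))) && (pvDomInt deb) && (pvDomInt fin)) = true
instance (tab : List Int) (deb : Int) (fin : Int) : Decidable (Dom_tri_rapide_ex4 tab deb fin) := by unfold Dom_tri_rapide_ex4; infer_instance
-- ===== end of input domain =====

-- B replaces A's recursion by an explicit stack of ranges with a running total (alternative
-- decomposition, same partition, same step count). Both Pythons sort `tab` in place with the
-- IDENTICAL sequence of swaps; the equivalence proved here is about the RETURN value.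

-- ===== PORT A =====
-- Python list index with negative wraparound (exact on Pre_, where every accessed index is in range)
def pyIdxN (len : Nat) (i : Int) : Nat := if i < 0 then (i + len).toNat else i.toNat

def pyGetI (t : List Int) (i : Int) : Int := t.getD (pyIdxN t.length i) 0

-- tab[i], tab[j] = tab[j], tab[i]
def echanger (t : List Int) (i j : Int) : List Int :=
  let a := pyGetI t i
  let b := pyGetI t j
  (t.set (pyIdxN t.length i) b).set (pyIdxN t.length j) a

def parition_ex4 (tab : List Int) (i j : Int) : List Int × Int :=
  let pos_mediane := i + PySem.Int.floordiv (j - i - 1) 2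
  let t1 := echanger tab i pos_mediane
  let indice_pivot := i
  if i < j then
    let r := (PySem.List.pyRange (i + 1) j 1).foldl
      (fun st n =>
        if pyGetI st.1 n < pyGetI st.1 indice_pivot then (echanger st.1 (st.2 + 1) n, st.2 + 1)
        else st)
      (t1, i)
    (echanger r.1 r.2 indice_pivot, r.2)
  else (t1, i)

-- recursion replaced by structural recursion on a fuel argument (pure totality guard:
-- the lemmas below prove the chosen fuel is never exhausted)
def tri_rapide_ex4Aux : Nat → List Int → Int → Int → List Int × Int
  | 0, tab, _, _ => (tab, 0)
  | fuel + 1, tab, deb, fin =>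
    if fin > deb then
      let p := parition_ex4 tab deb fin
      let g := tri_rapide_ex4Aux fuel p.1 deb p.2
      let dr := tri_rapide_ex4Aux fuel g.1 (p.2 + 1) fin
      (dr.1, (fin - deb + 1) + g.2 + dr.2)
    else (tab, 0)

def tri_rapide_ex4 (tab : List Int) (deb : Int) (fin : Int) : Int :=
  (tri_rapide_ex4Aux (fin - deb).toNat tab deb fin).2

-- ===== PORT B =====
-- while stack: pop (d,f); if f > d: partition, add f-d+1, push (pivot+1,f) then (d,pivot);
-- fuel is a pure totality guard for the while loop (proved sufficient below)
def runQuick : Nat → List Int → List (Int × Int) → Int → Int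
  | 0, _, _, total => total
  | fuel + 1, tab, stack, total =>
    match stack with
    | [] => total
    | (d, f) :: rest =>
      if f > d then
        let p := parition_ex4 tab d f
        runQuick fuel p.1 ((d, p.2) :: (p.2 + 1, f) :: rest) (total + (f - d + 1))
      else runQuick fuel tab rest total

def tri_rapide_ex4_alt (tab : List Int) (deb : Int) (fin : Int) : Int :=
  runQuick (2 * (fin - deb).toNat + 1) tab [(deb, fin)] 0

-- ===== PRECONDITION & SPEC =====
-- Pre_ excludes exactly the calls with fin > deb whose index window [deb, fin) leaves
-- Python's valid index range [-len(tab), len(tab)): there A raises IndexError.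
def Pre_tri_rapide_ex4 (tab : List Int) (deb : Int) (fin : Int) : Prop :=
  fin ≤ deb ∨ (-(tab.length : Int) ≤ deb ∧ fin ≤ (tab.length : Int))
instance (tab : List Int) (deb : Int) (fin : Int) : Decidable (Pre_tri_rapide_ex4 tab deb fin) := by
  unfold Pre_tri_rapide_ex4; infer_instance

def pvWitness_tri_rapide_ex4 : List Int × Int × Int := ([3, 1, 2], 0, 3)

def Spec_tri_rapide_ex4 (tab : List Int) (deb : Int) (fin : Int) (out : Int) : Prop := out = tri_rapide_ex4_alt tab deb fin
instance (tab : List Int) (deb : Int) (fin : Int) (out : Int) : Decidable (Spec_tri_rapide_ex4 tab deb fin out) := by unfold Spec_tri_rapide_ex4; infer_instance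

-- ===== CLAIM (what is proved, stated in full; the proofs are below) =====
def Claim_equal_tri_rapide_ex4 : Prop := ∀ (tab : List Int) (deb : Int) (fin : Int), Dom_tri_rapide_ex4 tab deb fin → Pre_tri_rapide_ex4 tab deb fin → Spec_tri_rapide_ex4 tab deb fin (tri_rapide_ex4 tab deb fin)

-- ===== LEMMAS AND PROOFS =====
-- the pivot lies in [i, j)
lemma parition_foldl_bounds (ip : Int) (l : List Int) :
    ∀ (t : List Int) (i : Int),
      i ≤ (l.foldl (fun st n =>
            if pyGetI st.1 n < pyGetI st.1 ip then (echanger st.1 (st.2 + 1) n, st.2 + 1)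
            else st) (t, i)).2 ∧
      (l.foldl (fun st n =>
            if pyGetI st.1 n < pyGetI st.1 ip then (echanger st.1 (st.2 + 1) n, st.2 + 1)
            else st) (t, i)).2 ≤ i + l.length := by
  induction l with
  | nil => intro t i; simp
  | cons a tl ih =>
    intro t i
    simp only [List.foldl_cons, List.length_cons]
    split_ifs with hc
    · have h := ih (echanger t (i + 1) a) (i + 1); push_cast; omega
    · have h := ih t i; push_cast; omega

lemma parition_bounds (tab : List Int) (d f : Int) (h : d < f) :
    d ≤ (parition_ex4 tab d f).2 ∧ (parition_ex4 tab d f).2 < f := by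
  unfold parition_ex4
  simp only [if_pos h]
  have hb := parition_foldl_bounds d (PySem.List.pyRange (d + 1) f 1)
      (echanger tab d (d + PySem.Int.floordiv (f - d - 1) 2)) d
  rw [PySem.List.length_pyRange_one] at hb
  omega

-- the result of A's recursion does not depend on the fuel once it covers the range size
lemma triAux_irrel : ∀ (n₁ : Nat), ∀ (n₂ : Nat) (tab : List Int) (d f : Int),
    (f - d).toNat ≤ n₁ → (f - d).toNat ≤ n₂ →
    tri_rapide_ex4Aux n₁ tab d f = tri_rapide_ex4Aux n₂ tab d f := by
  intro n₁
  induction n₁ with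
  | zero =>
    intro n₂ tab d f h1 h2
    have hnd : ¬ f > d := by omega
    cases n₂ with
    | zero => rfl
    | succ m => simp [tri_rapide_ex4Aux, hnd]
  | succ k ih =>
    intro n₂ tab d f h1 h2
    by_cases hfd : f > d
    · have hn : (f - d).toNat ≠ 0 := by omega
      cases n₂ with
      | zero => omega
      | succ m =>
        have hb := parition_bounds tab d f hfd
        simp only [tri_rapide_ex4Aux, if_pos hfd]
        have hg : tri_rapide_ex4Aux k (parition_ex4 tab d f).1 d (parition_ex4 tab d f).2
            = tri_rapide_ex4Aux m (parition_ex4 tab d f).1 d (parition_ex4 tab d f).2 :=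
          ih m _ _ _ (by omega) (by omega)
        rw [hg]
        have hdr := ih m (tri_rapide_ex4Aux m (parition_ex4 tab d f).1 d (parition_ex4 tab d f).2).1
            ((parition_ex4 tab d f).2 + 1) f (by omega) (by omega)
        rw [hdr]
    · cases n₂ with
      | zero => simp [tri_rapide_ex4Aux, hfd]
      | succ m => simp [tri_rapide_ex4Aux, hfd]

-- processing one range on top of the stack consumes exactly 2·size+1 loop iterations and
-- equals the recursive call on that range
lemma runQuick_cons : ∀ (n : Nat) (tab : List Int) (d f : Int), (f - d).toNat = n →
    ∀ (rest : List (Int × Int)) (total : Int) (fuel : Nat),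
      runQuick (2 * n + 1 + fuel) tab ((d, f) :: rest) total =
        runQuick fuel (tri_rapide_ex4Aux n tab d f).1 rest
          (total + (tri_rapide_ex4Aux n tab d f).2) := by
  intro n
  induction n using Nat.strong_induction_on with
  | _ n ih =>
    intro tab d f hn rest total fuel
    by_cases hfd : f > d
    · obtain ⟨m, rfl⟩ : ∃ m, n = m + 1 := ⟨n - 1, by omega⟩
      have hb := parition_bounds tab d f hfd
      set p := parition_ex4 tab d f with hp
      have ha : ((p.2 - d).toNat) + ((f - (p.2 + 1)).toNat) = m := by omega
      -- one loop step
      have hstep : runQuick (2 * (m + 1) + 1 + fuel) tab ((d, f) :: rest) total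
          = runQuick (2 * (m + 1) + fuel) p.1 ((d, p.2) :: (p.2 + 1, f) :: rest)
              (total + (f - d + 1)) := by
        have : 2 * (m + 1) + 1 + fuel = (2 * (m + 1) + fuel) + 1 := by omega
        rw [this]
        simp only [runQuick, if_pos hfd]
        rw [← hp]
      rw [hstep]
      set a := (p.2 - d).toNat with hadef
      set b := (f - (p.2 + 1)).toNat with hbdef
      have hsplit : 2 * (m + 1) + fuel = 2 * a + 1 + (2 * b + 1 + fuel) := by omega
      rw [hsplit]
      rw [ih a (by omega) p.1 d p.2 rfl]
      rw [ih b (by omega) _ (p.2 + 1) f rfl]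
      -- relate the sub-results at fuel a / b with the sub-results at fuel m
      simp only [tri_rapide_ex4Aux, if_pos hfd, ← hp]
      rw [triAux_irrel a m p.1 d p.2 (by omega) (by omega)]
      rw [triAux_irrel b m _ (p.2 + 1) f (by omega) (by omega)]
      ring_nf
    · have h0 : n = 0 := by omega
      subst h0
      have h1 : 2 * 0 + 1 + fuel = fuel + 1 := by omega
      rw [h1]
      simp only [runQuick, if_neg hfd, tri_rapide_ex4Aux]
      ring_nf

-- ===== VERDICT (by name: the statement is the Claim_ definition above) =====
theorem tri_rapide_ex4_spec : Claim_equal_tri_rapide_ex4 := by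
  intro tab deb fin _ _
  unfold Spec_tri_rapide_ex4 tri_rapide_ex4 tri_rapide_ex4_alt
  have h : 2 * (fin - deb).toNat + 1 = 2 * (fin - deb).toNat + 1 + 0 := by omega
  rw [h, runQuick_cons (fin - deb).toNat tab deb fin rfl [] 0 0]
  simp [runQuick]
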